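-- pv_equiv track=rewrite | github.com/Sunilkumarchoudari/Medical_Appointment_Scheduling_assigment | backend/agent/scheduling_agent.py | _extract_preferences
-- ===== SOURCE A (Python) =====
-- from typing import Dict, Optional, List
--
-- def _extract_preferences(message: str, conversation_history: str) -> Dict:
--     """Extract preferences from user message"""
--     preferences = {}
--
--     message_lower = message.lower()
--
--     # Time preference
--     if any(word in message_lower for word in ["morning", "am", "early"]):
--         preferences["time_preference"] = "morning"
--     elif any(word in message_lower for word in ["afternoon", "pm", "midday"]):
--         preferences["time_preference"] = "afternoon"
--     elif any(word in message_lower for word in ["evening", "late"]):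
--         preferences["time_preference"] = "evening"
--
--     # Date preference
--     if any(word in message_lower for word in ["asap", "soon", "urgent", "today", "now"]):
--         preferences["date_preference"] = "asap"
--     elif any(word in message_lower for word in ["tomorrow", "next week", "this week"]):
--         # Will be parsed by availability tool
--         preferences["date_preference"] = message_lower
--
--     return preferences
-- ===== SOURCE B (Python) =====
-- # B matches keywords by a single positional scan that builds a hit-set (startswith at
-- # each start index), then resolves each preference key against that set; A instead runs
-- # per-keyword substring tests in two hardcoded if/elif chains.
-- _KEYWORDS = ("morning", "am", "early", "afternoon", "pm", "midday", "evening", "late",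
--              "asap", "soon", "urgent", "today", "now", "tomorrow", "next week", "this week")
--
-- _TABLE = [
--     ("time_preference", [(("morning", "am", "early"), "morning"),
--                          (("afternoon", "pm", "midday"), "afternoon"),
--                          (("evening", "late"), "evening")]),
--     ("date_preference", [(("asap", "soon", "urgent", "today", "now"), "asap"),
--                          (("tomorrow", "next week", "this week"), None)]),
-- ]
--
-- def _match_set(text):
--     """Scan start positions left to right, collecting every keyword that begins there."""
--     return {kw for i in range(len(text) + 1)
--                for kw in _KEYWORDS if text.startswith(kw, i)}
--
-- def _extract_preferences(message: str, conversation_history: str) -> dict: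
--     text = message.lower()
--     hits = _match_set(text)
--     preferences = {}
--     for key, groups in _TABLE:
--         for words, value in groups:
--             if any(w in hits for w in words):
--                 preferences[key] = text if value is None else value
--                 break
--     return preferences
-- ===== Notes on version B (the rewrite author's own statement) =====
-- stated objective: alternative
-- what changed: B replaces A's per-keyword substring tests in two if/elif chains by a single positional scan of the lowercased message that builds a hit-set of keywords starting at each index, then resolves each preference key by set membership against a rule table.
import Mathlib
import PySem

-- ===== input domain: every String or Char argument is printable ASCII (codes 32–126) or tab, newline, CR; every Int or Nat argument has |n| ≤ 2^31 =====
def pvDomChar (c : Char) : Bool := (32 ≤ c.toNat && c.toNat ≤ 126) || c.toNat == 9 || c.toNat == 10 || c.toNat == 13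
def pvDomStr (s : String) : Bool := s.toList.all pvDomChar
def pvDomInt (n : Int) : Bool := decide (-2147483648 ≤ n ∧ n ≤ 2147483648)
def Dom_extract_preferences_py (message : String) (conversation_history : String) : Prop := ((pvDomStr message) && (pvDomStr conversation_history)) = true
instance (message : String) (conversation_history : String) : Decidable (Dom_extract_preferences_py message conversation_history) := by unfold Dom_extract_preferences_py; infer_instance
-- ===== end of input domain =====

-- B matches keywords by one positional scan building a hit-set, then resolves each
-- preference key by set membership against a rule table (alternative decomposition,
-- same asymptotic cost as A's two if/elif chains of substring tests).

-- ===== PORT A =====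
def extract_preferences_py (message : String) (conversation_history : String) : List (String × String) :=
  let preferences : PySem.Dict String String := PySem.Dict.empty
  let message_lower := PySem.Str.lower message
  -- Time preference
  let preferences :=
    if (["morning", "am", "early"].any fun word => PySem.Str.isIn word message_lower) then
      preferences.insert "time_preference" "morning"
    else if (["afternoon", "pm", "midday"].any fun word => PySem.Str.isIn word message_lower) then
      preferences.insert "time_preference" "afternoon"
    else if (["evening", "late"].any fun word => PySem.Str.isIn word message_lower) then
      preferences.insert "time_preference" "evening"
    else preferences
  -- Date preference
  let preferences :=
    if (["asap", "soon", "urgent", "today", "now"].any fun word => PySem.Str.isIn word message_lower) then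
      preferences.insert "date_preference" "asap"
    else if (["tomorrow", "next week", "this week"].any fun word => PySem.Str.isIn word message_lower) then
      preferences.insert "date_preference" message_lower
    else preferences
  preferences.items

-- ===== PORT B =====
def pvKeywords : List String :=
  ["morning", "am", "early", "afternoon", "pm", "midday", "evening", "late",
   "asap", "soon", "urgent", "today", "now", "tomorrow", "next week", "this week"]

def pvTable : List (String × List (List String × Option String)) :=
  [("time_preference", [(["morning", "am", "early"], some "morning"),
                        (["afternoon", "pm", "midday"], some "afternoon"),
                        (["evening", "late"], some "evening")]),
   ("date_preference", [(["asap", "soon", "urgent", "today", "now"], some "asap"),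
                        (["tomorrow", "next week", "this week"], none)])]

-- _match_set: one scan over start positions; text.startswith(kw, i) with 0 ≤ i is
-- exactly Chars.startswith on (text.toList.drop i.toNat).
def pvMatchSet (text : String) : PySem.Set String :=
  PySem.Set.ofList ((PySem.List.pyRange 0 ((PySem.Str.len text : Int) + 1) 1).flatMap
    (fun i => pvKeywords.filter (fun kw => PySem.Chars.startswith (text.toList.drop i.toNat) kw.toList)))

def extract_preferences_py_alt (message : String) (conversation_history : String) : List (String × String) :=
  let text := PySem.Str.lower message
  let hits := pvMatchSet text
  ((pvTable.foldl (fun (preferences : PySem.Dict String String) kg =>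
      match kg.2.find? (fun g => g.1.any (fun w => PySem.Set.contains hits w)) with
      | some g => preferences.insert kg.1 (match g.2 with | some v => v | none => text)
      | none => preferences) PySem.Dict.empty)).items

-- ===== PRECONDITION & SPEC =====
def Spec_extract_preferences_py (message : String) (conversation_history : String) (out : List (String × String)) : Prop := out = extract_preferences_py_alt message conversation_history
instance (message : String) (conversation_history : String) (out : List (String × String)) : Decidable (Spec_extract_preferences_py message conversation_history out) := by unfold Spec_extract_preferences_py; infer_instance

-- ===== CLAIM (what is proved, stated in full; the proofs are below) =====
def Claim_equal_extract_preferences_py : Prop := ∀ (message : String) (conversation_history : String), Dom_extract_preferences_py message conversation_history → Spec_extract_preferences_py message conversation_history (extract_preferences_py message conversation_history)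

-- ===== LEMMAS AND PROOFS =====
theorem mem_pvMatchSet (text : String) (w : String) :
    w ∈ pvMatchSet text ↔ w ∈ pvKeywords ∧ PySem.Str.isIn w text = true := by
  unfold pvMatchSet
  rw [PySem.Set.mem_ofList, List.mem_flatMap]
  constructor
  · rintro ⟨i, hi, hw⟩
    rw [List.mem_filter] at hw
    refine ⟨hw.1, ?_⟩
    rw [PySem.Str.isIn_eq, ← PySem.Chars.exists_prefix_drop_iff_isIn]
    exact ⟨i.toNat, (PySem.Chars.startswith_iff _ _).mp hw.2⟩
  · rintro ⟨hk, hin⟩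
    rw [PySem.Str.isIn_eq, ← PySem.Chars.exists_prefix_drop_iff_isIn] at hin
    obtain ⟨j, hj⟩ := hin
    refine ⟨(min j text.toList.length : Nat), ?_, ?_⟩
    · rw [PySem.List.mem_pyRange_one]
      constructor
      · exact_mod_cast Nat.zero_le _
      · rw [PySem.Str.len_eq]
        have := Nat.min_le_right j text.toList.length
        push_cast
        omega
    · rw [List.mem_filter]
      refine ⟨hk, (PySem.Chars.startswith_iff _ _).mpr ?_⟩
      have : ((min j text.toList.length : Nat) : Int).toNat = min j text.toList.length := by
        omega
      rw [this]
      rcases Nat.le_total j text.toList.length with h | h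
      · rwa [Nat.min_eq_left h]
      · rw [Nat.min_eq_right h, List.drop_length]
        rwa [List.drop_eq_nil_of_le h] at hj

theorem contains_pvMatchSet (text : String) (w : String) (hw : w ∈ pvKeywords) :
    PySem.Set.contains (pvMatchSet text) w = PySem.Str.isIn w text := by
  rcases h : PySem.Str.isIn w text with _ | _
  · rw [Bool.eq_false_iff]
    intro hc
    have hm : w ∈ pvMatchSet text := by
      simpa using List.mem_of_elem_eq_true hc
    rw [mem_pvMatchSet] at hm
    rw [hm.2] at h
    cases h
  · have : w ∈ pvMatchSet text := (mem_pvMatchSet text w).mpr ⟨hw, h⟩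
    exact List.elem_eq_true_of_mem this

set_option maxHeartbeats 2000000 in
theorem extract_preferences_eq (message conversation_history : String) :
    extract_preferences_py message conversation_history = extract_preferences_py_alt message conversation_history := by
  unfold extract_preferences_py extract_preferences_py_alt pvTable
  dsimp only
  simp only [List.foldl_cons, List.foldl_nil, List.find?, List.any_cons, List.any_nil,
    Bool.or_false]
  rw [contains_pvMatchSet _ "morning" (by decide), contains_pvMatchSet _ "am" (by decide),
      contains_pvMatchSet _ "early" (by decide), contains_pvMatchSet _ "afternoon" (by decide),
      contains_pvMatchSet _ "pm" (by decide), contains_pvMatchSet _ "midday" (by decide),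
      contains_pvMatchSet _ "evening" (by decide), contains_pvMatchSet _ "late" (by decide),
      contains_pvMatchSet _ "asap" (by decide), contains_pvMatchSet _ "soon" (by decide),
      contains_pvMatchSet _ "urgent" (by decide), contains_pvMatchSet _ "today" (by decide),
      contains_pvMatchSet _ "now" (by decide), contains_pvMatchSet _ "next week" (by decide),
      contains_pvMatchSet _ "this week" (by decide), contains_pvMatchSet _ "tomorrow" (by decide)]
  split_ifs <;> simp_all only [Bool.not_eq_true]

-- ===== VERDICT (by name: the statement is the Claim_ definition above) =====
theorem extract_preferences_py_spec : Claim_equal_extract_preferences_py := by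
  intro message conversation_history _
  unfold Spec_extract_preferences_py
  exact extract_preferences_eq message conversation_history
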